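-- pv_equiv track=rewrite | github.com/JoeIOU/metedata_fusion_tools | src/schema/metadata_eng_reverse.py | get_tables_from_constraint
-- ===== SOURCE A (Python) =====
-- def get_tables_from_constraint(const_list):
--     if const_list is None:
--         return None
--     ls_tables = []
--     for item in const_list:
--         table_name = item.get("TABLE_NAME")
--         table_name_ref = item.get("REFERENCED_TABLE_NAME")
--         if table_name is not None and ls_tables.count(table_name) <= 0:
--             ls_tables.append(table_name)
--         if table_name_ref is not None and ls_tables.count(table_name_ref) <= 0:
--             ls_tables.append(table_name_ref)
--     return ls_tables
-- ===== SOURCE B (Python) =====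
-- def get_tables_from_constraint(const_list):
--     if const_list is None:
--         return None
--     return _collect(list(const_list), 0)
--
--
-- def _collect(items, i):
--     # recursion on the structure: handle item i, recurse on the rest,
--     # then keep from the tail's result only names not already contributed here
--     if i >= len(items):
--         return []
--     item = items[i]
--     front = []
--     for name in (item.get("TABLE_NAME"), item.get("REFERENCED_TABLE_NAME")):
--         if name is not None and name not in front:
--             front.append(name)
--     rest = _collect(items, i + 1)
--     return front + [x for x in rest if x not in front]
-- ===== Notes on version B (the rewrite author's own statement) =====
-- stated objective: alternative
-- what changed: Replaces A's left-to-right accumulator loop with count-guarded appends by a structural recursion that builds the result back-to-front: each item contributes its own locally deduped pair of names up front, the recursive tail result is then filtered against that front before being appended.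
import Mathlib
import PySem

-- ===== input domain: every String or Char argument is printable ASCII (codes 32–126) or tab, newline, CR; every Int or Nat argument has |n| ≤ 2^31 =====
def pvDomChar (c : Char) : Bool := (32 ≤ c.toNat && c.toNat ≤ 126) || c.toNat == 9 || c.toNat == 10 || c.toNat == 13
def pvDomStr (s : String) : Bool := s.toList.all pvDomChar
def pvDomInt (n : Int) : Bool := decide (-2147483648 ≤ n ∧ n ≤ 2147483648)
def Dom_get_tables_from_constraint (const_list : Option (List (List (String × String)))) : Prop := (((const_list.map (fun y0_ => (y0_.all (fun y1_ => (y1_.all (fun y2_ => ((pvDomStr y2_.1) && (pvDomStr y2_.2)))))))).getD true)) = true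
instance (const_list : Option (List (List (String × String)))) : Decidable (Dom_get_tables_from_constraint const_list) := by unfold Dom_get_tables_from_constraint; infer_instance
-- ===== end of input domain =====

-- B builds the result by structural recursion (prepend each item's locally deduped names,
-- then filter the recursive tail result against them) instead of A's accumulator loop; alternative decomposition.


-- item.get(k): Python dict lookup (dicts are association lists under the type convention)
def pvDictGet (item : List (String × String)) (k : String) : Option String :=
  PySem.Dict.get? ⟨item⟩ k

-- ===== PORT A =====
-- one loop iteration of A: append table_name, then referenced name, each guarded by count ≤ 0
def pvStepA (ls_tables : List String) (item : List (String × String)) : List String :=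
  let table_name := pvDictGet item "TABLE_NAME"
  let table_name_ref := pvDictGet item "REFERENCED_TABLE_NAME"
  let ls1 :=
    match table_name with
    | some t => if PySem.List.count ls_tables t ≤ 0 then ls_tables ++ [t] else ls_tables
    | none => ls_tables
  match table_name_ref with
  | some t => if PySem.List.count ls1 t ≤ 0 then ls1 ++ [t] else ls1
  | none => ls1

def get_tables_from_constraint (const_list : Option (List (List (String × String)))) : Option (List String) :=
  match const_list with
  | none => none
  | some l => some (l.foldl pvStepA [])

-- ===== PORT B =====
-- front of one item: its two names, Nones skipped, locally deduped ("name not in front")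
def pvFront (item : List (String × String)) : List String :=
  [pvDictGet item "TABLE_NAME", pvDictGet item "REFERENCED_TABLE_NAME"].foldl
    (fun front name =>
      match name with
      | some n => if n ∉ front then front ++ [n] else front
      | none => front) []

-- _collect: structural recursion over the items (Source B recurses on the index; same traversal)
def pvCollect (items : List (List (String × String))) : List String :=
  match items with
  | [] => []
  | item :: rest =>
    let front := pvFront item
    front ++ (pvCollect rest).filter (fun x => x ∉ front)

def get_tables_from_constraint_alt (const_list : Option (List (List (String × String)))) : Option (List String) :=
  match const_list with
  | none => none
  | some l => some (pvCollect l)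

-- ===== PRECONDITION & SPEC =====
def Spec_get_tables_from_constraint (const_list : Option (List (List (String × String)))) (out : Option (List String)) : Prop := out = get_tables_from_constraint_alt const_list
instance (const_list : Option (List (List (String × String)))) (out : Option (List String)) : Decidable (Spec_get_tables_from_constraint const_list out) := by unfold Spec_get_tables_from_constraint; infer_instance

-- ===== CLAIM (what is proved, stated in full; the proofs are below) =====
def Claim_equal_get_tables_from_constraint : Prop := ∀ (const_list : Option (List (List (String × String)))), Dom_get_tables_from_constraint const_list → Spec_get_tables_from_constraint const_list (get_tables_from_constraint const_list)

-- ===== LEMMAS AND PROOFS =====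

-- the two candidate names of one item, Nones skipped, TABLE_NAME first
def pvItemNames (item : List (String × String)) : List String :=
  (pvDictGet item "TABLE_NAME").toList ++ (pvDictGet item "REFERENCED_TABLE_NAME").toList

-- first-occurrence dedup as a front recursion
def pvDedupF (l : List String) : List String :=
  match l with
  | [] => []
  | n :: ns => n :: (pvDedupF ns).filter (fun x => x ≠ n)

-- A's count-guarded append is exactly PySem.Set.add (append unless already present)
theorem pvCountAdd (s : List String) (n : String) :
    (if PySem.List.count s n ≤ 0 then s ++ [n] else s) = PySem.Set.add s n := by
  simp only [PySem.Set.add, PySem.Set.contains, PySem.List.count_eq, Nat.le_zero,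
    List.count_eq_zero]
  by_cases h : n ∈ s <;> simp [h]

-- one A-step = folding Set.add over that item's names
theorem pvStepA_eq (ls : List String) (item : List (String × String)) :
    pvStepA ls item = (pvItemNames item).foldl PySem.Set.add ls := by
  unfold pvStepA pvItemNames
  cases pvDictGet item "TABLE_NAME" <;> cases pvDictGet item "REFERENCED_TABLE_NAME" <;>
    simp only [Option.toList, List.singleton_append, List.foldl_cons, List.foldl_nil,
      List.append_nil, List.nil_append, pvCountAdd]

-- A's whole loop = folding Set.add over the flattened name list
theorem pvFoldA_eq (l : List (List (String × String))) (acc : List String) :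
    l.foldl pvStepA acc = (l.flatMap pvItemNames).foldl PySem.Set.add acc := by
  induction l generalizing acc with
  | nil => rfl
  | cons x xs ih => simp [List.flatMap_cons, List.foldl_append, pvStepA_eq, ih]

-- filtering by "already in acc" absorbs a filter on a member of acc
theorem pvFilter_mem (m acc : List String) (n : String) (h : n ∈ acc) :
    m.filter (fun x => x ∉ acc) = (m.filter (fun x => x ≠ n)).filter (fun x => x ∉ acc) := by
  rw [List.filter_filter]
  apply List.filter_congr
  intro x _
  by_cases hx : x = n
  · subst hx; simp [h]
  · simp [hx]

-- filtering by "∉ acc ++ [n]" splits into the two filters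
theorem pvFilter_notmem (m acc : List String) (n : String) :
    m.filter (fun x => x ∉ acc ++ [n]) = (m.filter (fun x => x ≠ n)).filter (fun x => x ∉ acc) := by
  rw [List.filter_filter]
  apply List.filter_congr
  intro x _
  by_cases hx : x = n
  · subst hx; simp
  · simp [hx]

-- the accumulator fold of Set.add, expressed via the front recursion pvDedupF
theorem pvFoldAdd_eq (l : List String) (acc : List String) :
    l.foldl PySem.Set.add acc = acc ++ (pvDedupF l).filter (fun x => x ∉ acc) := by
  induction l generalizing acc with
  | nil => simp [pvDedupF]
  | cons n ns ih =>
    rw [List.foldl_cons, ih,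
      show pvDedupF (n :: ns) = n :: (pvDedupF ns).filter (fun x => x ≠ n) from rfl,
      List.filter_cons]
    by_cases h : n ∈ acc
    · have hadd : PySem.Set.add acc n = acc := by
        simp [PySem.Set.add, PySem.Set.contains, h]
      rw [hadd, if_neg (by simp [h]), pvFilter_mem (pvDedupF ns) acc n h]
    · have hadd : PySem.Set.add acc n = acc ++ [n] := by
        simp [PySem.Set.add, PySem.Set.contains, h]
      rw [hadd, if_pos (by simp [h]), pvFilter_notmem (pvDedupF ns) acc n,
        List.append_assoc, List.singleton_append]

-- an item's front = pvDedupF of its names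
theorem pvFront_eq (item : List (String × String)) :
    pvFront item = pvDedupF (pvItemNames item) := by
  unfold pvFront pvItemNames
  cases pvDictGet item "TABLE_NAME" with
  | none =>
    cases pvDictGet item "REFERENCED_TABLE_NAME" <;> simp [pvDedupF]
  | some a =>
    cases pvDictGet item "REFERENCED_TABLE_NAME" with
    | none => simp [pvDedupF]
    | some b =>
      by_cases hba : b = a
      · subst hba; simp [pvDedupF]
      · simp [pvDedupF, hba]

-- pvDedupF distributes over append, filtering the tail part
theorem pvDedupF_append (a b : List String) :
    pvDedupF (a ++ b) = pvDedupF a ++ (pvDedupF b).filter (fun x => x ∉ a) := by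
  induction a with
  | nil => simp [pvDedupF]
  | cons n ns ih =>
    simp only [List.cons_append, pvDedupF, ih, List.filter_append]
    rw [List.filter_filter]
    congr 2
    apply List.filter_congr
    intro x _
    by_cases hx : x = n
    · subst hx; simp
    · simp [hx]

-- filtering by "∉ a" = filtering by "∉ pvDedupF a" (same membership)
theorem pvMem_dedupF (x : String) (l : List String) : x ∈ pvDedupF l ↔ x ∈ l := by
  induction l with
  | nil => simp [pvDedupF]
  | cons n ns ih =>
    simp only [pvDedupF, List.mem_cons, List.mem_filter, ih, decide_eq_true_eq]
    constructor
    · rintro (h | ⟨h, _⟩) <;> simp [h]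
    · rintro (h | h)
      · exact Or.inl h
      · by_cases hx : x = n
        · exact Or.inl hx
        · exact Or.inr ⟨h, hx⟩

-- B's recursion computes pvDedupF of the flattened names
theorem pvCollect_eq (l : List (List (String × String))) :
    pvCollect l = pvDedupF (l.flatMap pvItemNames) := by
  induction l with
  | nil => rfl
  | cons item rest ih =>
    simp only [pvCollect, List.flatMap_cons, pvDedupF_append, pvFront_eq, ih]
    congr 1
    apply List.filter_congr
    intro x _
    simp [pvMem_dedupF]

-- ===== VERDICT (by name: the statement is the Claim_ definition above) =====
theorem get_tables_from_constraint_spec : Claim_equal_get_tables_from_constraint := by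
  intro const_list _
  unfold Spec_get_tables_from_constraint get_tables_from_constraint get_tables_from_constraint_alt
  cases const_list with
  | none => rfl
  | some l =>
    simp [pvFoldA_eq, pvFoldAdd_eq, pvCollect_eq]
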